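-- pv_equiv track=rewrite | github.com/Daamn087/yugioh-deck-simulator | scripts/update_changelog.py | analyze_changes
-- ===== SOURCE A (Python) =====
-- def analyze_changes(files):
--     areas = []
--     for f in files:
--         if f.startswith("frontend/"):
--             areas.append("frontend")
--         elif f.startswith("backend/"):
--             areas.append("backend")
--         elif f.startswith("tests/"):
--             areas.append("tests")
--         else:
--             areas.append("other")
--
--     areas = sorted(list(set(areas)))
--     return f"Updated {', '.join(areas)}: {', '.join(files[:3])}" + ("..." if len(files) > 3 else "")
-- ===== SOURCE B (Python) =====
-- def analyze_changes(files):
--     def present(prefix):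
--         return any(f.startswith(prefix) for f in files)
--
--     def is_other(f):
--         return not (f.startswith("frontend/") or f.startswith("backend/") or f.startswith("tests/"))
--
--     flags = [("backend", present("backend/")),
--              ("frontend", present("frontend/")),
--              ("other", any(is_other(f) for f in files)),
--              ("tests", present("tests/"))]
--     areas = [name for name, ok in flags if ok]
--     return f"Updated {', '.join(areas)}: {', '.join(files[:3])}" + ("..." if len(files) > 3 else "")
-- ===== Notes on version B (the rewrite author's own statement) =====
-- stated objective: simpler
-- what changed: Replaces the per-file category-append loop plus sorted(set(...)) with four presence tests (one any() per category) filtering a fixed category list that is already in alphabetical order.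
import Mathlib
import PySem

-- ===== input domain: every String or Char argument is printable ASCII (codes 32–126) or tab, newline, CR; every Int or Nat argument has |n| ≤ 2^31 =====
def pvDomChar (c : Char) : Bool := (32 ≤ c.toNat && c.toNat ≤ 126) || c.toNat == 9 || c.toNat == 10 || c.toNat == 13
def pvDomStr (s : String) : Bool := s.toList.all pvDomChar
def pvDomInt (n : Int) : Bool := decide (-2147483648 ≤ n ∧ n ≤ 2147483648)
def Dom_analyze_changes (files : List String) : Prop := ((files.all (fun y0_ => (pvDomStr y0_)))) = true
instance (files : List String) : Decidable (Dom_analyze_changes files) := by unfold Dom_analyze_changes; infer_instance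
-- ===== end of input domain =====

-- B replaces A's per-file category-append loop and sorted(set(...)) with four presence
-- tests filtering the fixed, already-alphabetical category list (objective: simpler).


-- ===== PORT A =====
def analyze_changes (files : List String) : String :=
  "Updated " ++ PySem.Str.join ", "
      (PySem.List.sorted (PySem.Set.ofList (files.foldl (fun acc f =>
        if PySem.Str.startswith f "frontend/" then acc ++ ["frontend"]
        else if PySem.Str.startswith f "backend/" then acc ++ ["backend"]
        else if PySem.Str.startswith f "tests/" then acc ++ ["tests"]
        else acc ++ ["other"]) [])) (fun x => x) false) ++ ": " ++
    PySem.Str.join ", " (PySem.List.slice files none (some 3)) ++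
    (if files.length > 3 then "..." else "")

-- ===== PORT B =====
def analyze_changes_alt (files : List String) : String :=
  "Updated " ++ PySem.Str.join ", "
      ((([("backend", files.any (fun f => PySem.Str.startswith f "backend/")),
          ("frontend", files.any (fun f => PySem.Str.startswith f "frontend/")),
          ("other", files.any (fun f =>
             !(PySem.Str.startswith f "frontend/" || PySem.Str.startswith f "backend/" ||
               PySem.Str.startswith f "tests/"))),
          ("tests", files.any (fun f => PySem.Str.startswith f "tests/"))] :
         List (String × Bool)).filter (fun nb => nb.2)).map (fun nb => nb.1)) ++ ": " ++
    PySem.Str.join ", " (PySem.List.slice files none (some 3)) ++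
    (if files.length > 3 then "..." else "")

-- ===== PRECONDITION & SPEC =====
def Spec_analyze_changes (files : List String) (out : String) : Prop := out = analyze_changes_alt files
instance (files : List String) (out : String) : Decidable (Spec_analyze_changes files out) := by unfold Spec_analyze_changes; infer_instance

-- ===== CLAIM (what is proved, stated in full; the proofs are below) =====
def Claim_equal_analyze_changes : Prop := ∀ (files : List String), Dom_analyze_changes files → Spec_analyze_changes files (analyze_changes files)

-- ===== LEMMAS AND PROOFS =====

-- the category A appends for one file
def pvCat (f : String) : String :=
  if PySem.Str.startswith f "frontend/" then "frontend"
  else if PySem.Str.startswith f "backend/" then "backend"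
  else if PySem.Str.startswith f "tests/" then "tests"
  else "other"

lemma pvFoldA (files : List String) (acc : List String) :
    files.foldl (fun acc f =>
      if PySem.Str.startswith f "frontend/" then acc ++ ["frontend"]
      else if PySem.Str.startswith f "backend/" then acc ++ ["backend"]
      else if PySem.Str.startswith f "tests/" then acc ++ ["tests"]
      else acc ++ ["other"]) acc = acc ++ files.map pvCat := by
  induction files generalizing acc with
  | nil => simp
  | cons f t ih =>
    rw [List.foldl_cons, List.map_cons, ih,
      show (if PySem.Str.startswith f "frontend/" then acc ++ ["frontend"]
        else if PySem.Str.startswith f "backend/" then acc ++ ["backend"]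
        else if PySem.Str.startswith f "tests/" then acc ++ ["tests"]
        else acc ++ ["other"]) = acc ++ [pvCat f] from by
          unfold pvCat; split_ifs <;> rfl]
    simp

-- two string prefixes with different first characters cannot both hold
lemma pvExcl (s p q : String)
    (h : ¬ (p.toList <+: q.toList) ∧ ¬ (q.toList <+: p.toList)) :
    ¬ (PySem.Str.startswith s p = true ∧ PySem.Str.startswith s q = true) := by
  rintro ⟨h1, h2⟩
  rw [PySem.Str.startswith_eq, PySem.Chars.startswith_iff] at h1 h2
  rcases List.prefix_or_prefix_of_prefix h1 h2 with hp | hp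
  · exact h.1 hp
  · exact h.2 hp

lemma pvCat_backend (f : String) :
    pvCat f = "backend" ↔ PySem.Str.startswith f "backend/" = true := by
  unfold pvCat
  split_ifs with h1 h2 h3
  · exact iff_of_false (by decide) (fun hb => pvExcl f "frontend/" "backend/" (by decide) ⟨h1, hb⟩)
  · exact iff_of_true rfl h2
  · exact iff_of_false (by decide) h2
  · exact iff_of_false (by decide) h2

lemma pvCat_frontend (f : String) :
    pvCat f = "frontend" ↔ PySem.Str.startswith f "frontend/" = true := by
  unfold pvCat
  split_ifs with h1 h2 h3
  · exact iff_of_true rfl h1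
  · exact iff_of_false (by decide) h1
  · exact iff_of_false (by decide) h1
  · exact iff_of_false (by decide) h1

lemma pvCat_tests (f : String) :
    pvCat f = "tests" ↔ PySem.Str.startswith f "tests/" = true := by
  unfold pvCat
  split_ifs with h1 h2 h3
  · exact iff_of_false (by decide) (fun ht => pvExcl f "frontend/" "tests/" (by decide) ⟨h1, ht⟩)
  · exact iff_of_false (by decide) (fun ht => pvExcl f "backend/" "tests/" (by decide) ⟨h2, ht⟩)
  · exact iff_of_true rfl h3
  · exact iff_of_false (by decide) h3

lemma pvCat_other (f : String) :
    pvCat f = "other" ↔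
      (!(PySem.Str.startswith f "frontend/" || PySem.Str.startswith f "backend/" ||
         PySem.Str.startswith f "tests/")) = true := by
  unfold pvCat
  split_ifs with h1 h2 h3
  · exact iff_of_false (by decide) (by simp only [h1]; simp)
  · exact iff_of_false (by decide) (by simp only [h2]; simp)
  · exact iff_of_false (by decide) (by simp only [h3]; simp)
  · exact iff_of_true rfl (by
      simp only [Bool.not_eq_true] at h1 h2 h3
      rw [h1, h2, h3]; rfl)

lemma pvCat_mem (f : String) : pvCat f ∈ (["backend", "frontend", "other", "tests"] : List String) := by
  unfold pvCat; split_ifs <;> simp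

-- the core: sorted(set(areas_A)) = B's filtered fixed list
lemma pvAreas (files : List String) :
    PySem.List.sorted (PySem.Set.ofList (files.map pvCat)) (fun x => x) false =
      (([("backend", files.any (fun f => PySem.Str.startswith f "backend/")),
         ("frontend", files.any (fun f => PySem.Str.startswith f "frontend/")),
         ("other", files.any (fun f =>
            !(PySem.Str.startswith f "frontend/" || PySem.Str.startswith f "backend/" ||
              PySem.Str.startswith f "tests/"))),
         ("tests", files.any (fun f => PySem.Str.startswith f "tests/"))] :
        List (String × Bool)).filter (fun nb => nb.2)).map (fun nb => nb.1) := by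
  apply PySem.List.sorted_eq_of_perm_of_pairwise_lt
  · refine (List.perm_ext_iff_of_nodup ?nd1 (PySem.Set.nodup_ofList _)).mpr ?mem
    case nd1 =>
      exact (List.filter_sublist.map _).nodup
        (show (["backend", "frontend", "other", "tests"] : List String).Nodup by decide)
    case mem =>
      intro x
      simp only [PySem.Set.mem_ofList, List.mem_map, List.mem_filter]
      constructor
      · rintro ⟨⟨n, b⟩, ⟨hmem, hb⟩, rfl⟩
        simp only [List.mem_cons, List.not_mem_nil, or_false, Prod.mk.injEq] at hmem
        rcases hmem with ⟨rfl, rfl⟩ | ⟨rfl, rfl⟩ | ⟨rfl, rfl⟩ | ⟨rfl, rfl⟩ <;>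
          simp only [List.any_eq_true] at hb <;> obtain ⟨f, hf, hpf⟩ := hb
        · exact ⟨f, hf, (pvCat_backend f).mpr hpf⟩
        · exact ⟨f, hf, (pvCat_frontend f).mpr hpf⟩
        · exact ⟨f, hf, (pvCat_other f).mpr hpf⟩
        · exact ⟨f, hf, (pvCat_tests f).mpr hpf⟩
      · rintro ⟨f, hf, rfl⟩
        have hm := pvCat_mem f
        simp only [List.mem_cons, List.not_mem_nil, or_false] at hm
        rcases hm with h | h | h | h
        · exact ⟨("backend", files.any fun g => PySem.Str.startswith g "backend/"),
            ⟨by simp, List.any_eq_true.mpr ⟨f, hf, (pvCat_backend f).mp h⟩⟩, h.symm⟩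
        · exact ⟨("frontend", files.any fun g => PySem.Str.startswith g "frontend/"),
            ⟨by simp, List.any_eq_true.mpr ⟨f, hf, (pvCat_frontend f).mp h⟩⟩, h.symm⟩
        · exact ⟨("other", files.any fun g =>
              !(PySem.Str.startswith g "frontend/" || PySem.Str.startswith g "backend/" ||
                PySem.Str.startswith g "tests/")),
            ⟨by simp, List.any_eq_true.mpr ⟨f, hf, (pvCat_other f).mp h⟩⟩, h.symm⟩
        · exact ⟨("tests", files.any fun g => PySem.Str.startswith g "tests/"),
            ⟨by simp, List.any_eq_true.mpr ⟨f, hf, (pvCat_tests f).mp h⟩⟩, h.symm⟩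
  · -- strictly increasing: a sublist of the strictly increasing fixed list
    refine List.Pairwise.sublist (List.filter_sublist.map _)
      (show (["backend", "frontend", "other", "tests"] : List String).Pairwise (· < ·) from ?_)
    refine List.Pairwise.cons ?_ (List.Pairwise.cons ?_ (List.Pairwise.cons ?_
      (List.pairwise_singleton _ _))) <;> intro b hb <;> fin_cases hb <;>
      exact String.lt_iff_toList_lt.mpr (by decide)

-- ===== VERDICT (by name: the statement is the Claim_ definition above) =====
theorem analyze_changes_spec : Claim_equal_analyze_changes := by
  intro files _
  show analyze_changes files = analyze_changes_alt files
  unfold analyze_changes analyze_changes_alt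
  rw [pvFoldA files [], List.nil_append, pvAreas files]
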